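-- pv_equiv track=rewrite | github.com/kobirhumayun/customs-commercial-automation | project/workflows/ud_ip_exp/matching.py | _leading_decimal_token
-- ===== SOURCE A (Python) =====
-- def _leading_decimal_token(value: str) -> str | None:
--     normalized = value.strip().replace(",", "")
--     token = ""
--     for character in normalized:
--         if character.isdigit() or character == "." or (character == "-" and not token):
--             token += character
--         elif token:
--             break
--     return token if token and token not in {"-", "."} else None
-- ===== SOURCE B (Python) =====
-- def _leading_decimal_token(value: str) -> str | None:
--     normalized = value.strip().replace(",", "")
--     start = next((i for i, ch in enumerate(normalized) if ch.isdigit() or ch in ".-"), None)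
--     if start is None:
--         return None
--     rest = normalized[start + 1:]
--     end = next((i for i, ch in enumerate(rest) if not (ch.isdigit() or ch == ".")), len(rest))
--     token = normalized[start] + rest[:end]
--     return None if token in {"-", "."} else token
-- ===== Notes on version B (the rewrite author's own statement) =====
-- stated objective: idiomatic
-- what changed: Replaces A's accumulator loop with breaking branch logic by a leftmost-match decomposition: locate the first digit/dot/minus with next(), then slice off the following digit/dot span (drop-then-take instead of scan-with-state).
import Mathlib
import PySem

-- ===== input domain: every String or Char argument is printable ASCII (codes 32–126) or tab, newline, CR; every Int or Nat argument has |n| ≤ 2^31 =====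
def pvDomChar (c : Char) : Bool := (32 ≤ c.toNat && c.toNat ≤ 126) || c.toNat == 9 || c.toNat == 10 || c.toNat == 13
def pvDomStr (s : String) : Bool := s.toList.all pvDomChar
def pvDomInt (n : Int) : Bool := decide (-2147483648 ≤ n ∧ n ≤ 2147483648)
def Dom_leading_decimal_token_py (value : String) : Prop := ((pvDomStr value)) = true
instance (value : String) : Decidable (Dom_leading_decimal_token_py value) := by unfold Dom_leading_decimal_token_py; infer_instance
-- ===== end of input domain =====

-- B replaces A's accumulate-with-break scan by a drop-then-take decomposition (idiomatic; same cost).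


-- ===== PORT A =====
-- A's for-loop with break: token accumulator, branch order as in the Python.
def pvLoopA : List Char → List Char → List Char
  | [], tok => tok
  | c :: cs, tok =>
    if PySem.Chars.isdigit c || c == '.' || (c == '-' && tok.isEmpty) then
      pvLoopA cs (tok ++ [c])
    else if !tok.isEmpty then tok
    else pvLoopA cs tok

def leading_decimal_token_py (value : String) : Option String :=
  let normalized := (PySem.Str.replace (PySem.Str.strip value) "," "").toList
  let token := pvLoopA normalized []
  if token ≠ [] ∧ token ≠ ['-'] ∧ token ≠ ['.'] then some (String.ofList token) else none

-- ===== PORT B =====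
def pvStarter (c : Char) : Bool := PySem.Chars.isdigit c || c == '.' || c == '-'
def pvBody (c : Char) : Bool := PySem.Chars.isdigit c || c == '.'

-- B: drop the non-starters (the `next(... enumerate ...)` search), then the starter char
-- plus the digit/dot span that follows (the second `next` + slice).
def leading_decimal_token_py_alt (value : String) : Option String :=
  let normalized := (PySem.Str.replace (PySem.Str.strip value) "," "").toList
  match normalized.dropWhile (fun c => !pvStarter c) with
  | [] => none
  | c :: rest =>
    let token := c :: rest.takeWhile pvBody
    if token = ['-'] ∨ token = ['.'] then none else some (String.ofList token)

-- ===== PRECONDITION & SPEC =====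
def Spec_leading_decimal_token_py (value : String) (out : Option String) : Prop := out = leading_decimal_token_py_alt value
instance (value : String) (out : Option String) : Decidable (Spec_leading_decimal_token_py value out) := by unfold Spec_leading_decimal_token_py; infer_instance

-- ===== CLAIM (what is proved, stated in full; the proofs are below) =====
def Claim_equal_leading_decimal_token_py : Prop := ∀ (value : String), Dom_leading_decimal_token_py value → Spec_leading_decimal_token_py value (leading_decimal_token_py value)

-- ===== LEMMAS AND PROOFS =====

-- once the token is nonempty, A's loop appends exactly the digit/dot prefix, then stops
lemma pvLoopA_take (cs : List Char) : ∀ tok : List Char, tok ≠ [] →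
    pvLoopA cs tok = tok ++ cs.takeWhile pvBody := by
  induction cs with
  | nil => intro tok _; simp [pvLoopA]
  | cons c cs ih =>
    intro tok htok
    have hne : tok.isEmpty = false := by simpa [List.isEmpty_iff] using htok
    have hcond : (PySem.Chars.isdigit c || c == '.' || (c == '-' && tok.isEmpty)) = pvBody c := by
      simp [pvBody, hne]
    rw [pvLoopA, hcond]
    by_cases hb : pvBody c = true
    · rw [if_pos hb, ih (tok ++ [c]) (by simp), List.takeWhile_cons_of_pos hb]
      simp
    · have hb' : pvBody c = false := by simpa using hb
      rw [if_neg (by simp [hb']), if_pos (by simp [hne]), List.takeWhile_cons_of_neg (by simp [hb'])]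
      simp

-- A's loop from the empty token computes B's drop-then-take value
lemma pvLoopA_eq (cs : List Char) :
    pvLoopA cs [] = match cs.dropWhile (fun c => !pvStarter c) with
      | [] => []
      | c :: rest => c :: rest.takeWhile pvBody := by
  induction cs with
  | nil => simp [pvLoopA]
  | cons c cs ih =>
    have hcond : (PySem.Chars.isdigit c || c == '.' || (c == '-' && ([] : List Char).isEmpty)) = pvStarter c := by
      simp [pvStarter]
    rw [pvLoopA, hcond]
    by_cases hs : pvStarter c = true
    · rw [if_pos hs, show ([]:List Char) ++ [c] = [c] from rfl, pvLoopA_take cs [c] (by simp), List.dropWhile_cons_of_neg (by simp [hs])]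
      simp
    · have hs' : pvStarter c = false := by simpa using hs
      rw [if_neg (by simp [hs']), if_neg (by simp), ih, List.dropWhile_cons_of_pos (by simp [hs'])]

-- ===== VERDICT (by name: the statement is the Claim_ definition above) =====
theorem leading_decimal_token_py_spec : Claim_equal_leading_decimal_token_py := by
  intro value _
  simp only [Spec_leading_decimal_token_py, leading_decimal_token_py, leading_decimal_token_py_alt]
  rw [pvLoopA_eq]
  cases h : (PySem.Str.replace (PySem.Str.strip value) "," "").toList.dropWhile (fun c => !pvStarter c) with
  | nil => simp
  | cons c rest =>
    simp only []
    by_cases h1 : c :: rest.takeWhile pvBody = ['-'] <;>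
    by_cases h2 : c :: rest.takeWhile pvBody = ['.'] <;>
      simp [h1, h2]
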